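-- pv_equiv track=rewrite | github.com/colinjansen/advent_of_code | 2025/day4.py | part_2
-- ===== SOURCE A (Python) =====
-- def adjacent_rolls(M, r, c):
--     adjacent = 0
--     for dr, dc in [(-1,-1), (-1,0), (-1,1), (0,-1), (0,1), (1,-1), (1,0), (1, 1)]:
--         _r = r + dr
--         _c = c + dc
--         if _r < 0 or _c < 0 or _r >= len(M) or _c >= len(M[0]):
--             continue
--         if M[_r][_c] == '@':
--             adjacent += 1
--     return adjacent
--
-- def can_remove(M, r, c):
--     return  M[r][c] == '@' and adjacent_rolls(M, r, c) < 4
--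
-- def part_2(M):
--     part_2 = 0
--
--     def turn():
--         removed = 0
--         for r in range(len(M)):
--             for c in range(len(M[0])):
--                 if can_remove(M, r, c):
--                     M[r][c] = '.'
--                     removed += 1
--         return removed
--
--     r = turn()
--     while r > 0:
--         part_2 += r
--         r = turn()
--
--     return part_2
-- ===== SOURCE B (Python) =====
-- def part_2(M):
--     C = len(M[0]) if M else 0
--     cells = [(r, c) for r in range(len(M)) for c in range(C) if M[r][c] == '@']
--     live = set(cells)
--
--     def nbrs(p):
--         return [(p[0] + dr, p[1] + dc)
--                 for dr in (-1, 0, 1) for dc in (-1, 0, 1) if (dr, dc) != (0, 0)]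
--
--     def deg(p):
--         return sum(1 for q in nbrs(p) if q in live)
--
--     removed = 0
--     pending = [p for p in cells if deg(p) < 4]
--     while pending:
--         nxt = []
--         for p in pending:
--             if p in live and deg(p) < 4:
--                 live.discard(p)
--                 removed += 1
--                 nxt.extend(nbrs(p))
--         pending = nxt
--     return removed
-- ===== Notes on version B (the rewrite author's own statement) =====
-- stated objective: alternative
-- what changed: A repeatedly rescans and mutates the whole grid until a full pass removes nothing; B computes the set of '@' cells once and peels it with a worklist, re-examining only the neighbours of cells it just removed, which is correct because the surviving set is the unique maximal subset in which every cell has at least 4 live neighbours.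
import Mathlib
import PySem

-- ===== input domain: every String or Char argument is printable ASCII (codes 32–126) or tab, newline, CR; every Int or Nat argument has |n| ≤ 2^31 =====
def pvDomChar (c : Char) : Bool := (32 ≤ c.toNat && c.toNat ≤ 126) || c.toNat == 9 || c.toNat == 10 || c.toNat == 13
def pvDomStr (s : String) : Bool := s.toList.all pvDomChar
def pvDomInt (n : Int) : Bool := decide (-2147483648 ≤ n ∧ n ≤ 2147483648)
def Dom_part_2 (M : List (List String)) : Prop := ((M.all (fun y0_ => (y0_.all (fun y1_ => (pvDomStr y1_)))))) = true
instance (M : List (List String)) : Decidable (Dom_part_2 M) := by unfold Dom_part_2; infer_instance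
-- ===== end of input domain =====

-- B peels the set of '@' cells with a worklist (A repeatedly rescans and mutates the whole grid
-- until a pass removes nothing); equivalence is about the RETURN value only — Python A mutates
-- its argument M in place, B does not.

-- ===== PORT A =====
-- the 8 neighbour offsets A iterates (B's neighbour comprehension enumerates the same 8 offsets)
def off8 : List (Int × Int) := [(-1,-1),(-1,0),(-1,1),(0,-1),(0,1),(1,-1),(1,0),(1,1)]

-- M[i][j] (Python double indexing; `none` = IndexError)
def cellAt (M : List (List String)) (i j : Int) : Option String :=
  (PySem.List.pyGet? M i).bind (fun row => PySem.List.pyGet? row j)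

def adjacentRolls (M : List (List String)) (r c : Int) : Int :=
  off8.foldl (fun adjacent d =>
    if r + d.1 < 0 ∨ c + d.2 < 0 ∨ (M.length : Int) ≤ r + d.1 ∨
        ((M.headD []).length : Int) ≤ c + d.2 then
      adjacent
    else if cellAt M (r + d.1) (c + d.2) = some "@" then adjacent + 1
    else adjacent) 0

def canRemove (M : List (List String)) (r c : Int) : Bool :=
  decide (cellAt M r c = some "@") && decide (adjacentRolls M r c < 4)

-- M[r][c] = '.' (in-range assignment)
def setAt (M : List (List String)) (r c : Nat) : List (List String) :=
  M.set r ((M.getD r []).set c ".")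

def turnStep (r : Nat) (st : List (List String) × Int) (c : Nat) : List (List String) × Int :=
  if canRemove st.1 (r : Int) (c : Int) then (setAt st.1 r c, st.2 + 1) else st

def turnRow (st : List (List String) × Int) (r : Nat) : List (List String) × Int :=
  (List.range ((st.1.headD []).length)).foldl (turnStep r) st

def turn (M : List (List String)) : List (List String) × Int :=
  (List.range M.length).foldl turnRow (M, 0)

-- termination support for part2Go: the number of '@' cells strictly drops on a removing turn
def atCount (M : List (List String)) : Nat := (M.map (fun row => row.count "@")).sum

lemma count_set_lt (row : List String) (c : Nat) (hc : c < row.length)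
    (h : row.getD c "" = "@") : (row.set c ".").count "@" < row.count "@" := by
  induction row generalizing c with
  | nil => simp at hc
  | cons a t ih =>
    cases c with
    | zero =>
      simp only [List.getD_cons_zero] at h
      subst h
      simp
    | succ n =>
      simp only [List.getD_cons_succ] at h
      simp only [List.length_cons, Nat.succ_lt_succ_iff] at hc
      simp only [List.set_cons_succ, List.count_cons]
      have := ih n hc h
      omega

lemma atCount_setAt (M : List (List String)) (r c : Nat) (hr : r < M.length)
    (hc : c < (M.getD r []).length) (h : (M.getD r []).getD c "" = "@") :
    atCount (setAt M r c) < atCount M := by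
  induction M generalizing r with
  | nil => simp at hr
  | cons row t ih =>
    cases r with
    | zero =>
      simp only [List.getD_cons_zero] at hc h
      simp only [setAt, List.getD_cons_zero, List.set_cons_zero, atCount, List.map_cons,
        List.sum_cons]
      have := count_set_lt row c hc h
      omega
    | succ n =>
      simp only [List.getD_cons_succ] at hc h
      simp only [List.length_cons, Nat.succ_lt_succ_iff] at hr
      have := ih n hr hc h
      simp only [setAt, List.getD_cons_succ, List.set_cons_succ, atCount, List.map_cons,
        List.sum_cons] at *
      omega

lemma cellAt_eq_some_iff (M : List (List String)) (r c : Nat) (s : String) :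
    cellAt M (r : Int) (c : Int) = some s ↔
      r < M.length ∧ c < (M.getD r []).length ∧ (M.getD r []).getD c "" = s := by
  unfold cellAt
  simp only [PySem.List.pyGet?_natCast]
  cases hr : M[r]? with
  | none =>
    have hle : M.length ≤ r := by simpa using List.getElem?_eq_none_iff.mp hr
    constructor
    · intro h
      exact absurd (show (none : Option String) = some s from h) (by simp)
    · rintro ⟨h1, -⟩; omega
  | some row =>
    have hrlt : r < M.length := by
      by_contra hge
      rw [List.getElem?_eq_none (by omega)] at hr; cases hr
    have hrow : M.getD r [] = row := by
      rw [List.getD_eq_getElem?_getD, hr]; rfl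
    rw [hrow]
    constructor
    · intro h
      have h' : row[c]? = some s := h
      rcases List.getElem?_eq_some_iff.mp h' with ⟨hlt, heq⟩
      refine ⟨hrlt, hlt, ?_⟩
      rw [List.getD_eq_getElem?_getD, List.getElem?_eq_getElem hlt, heq]; rfl
    · rintro ⟨-, hlt, heq⟩
      show row[c]? = some s
      rw [List.getElem?_eq_some_iff]
      refine ⟨hlt, ?_⟩
      rw [← heq, List.getD_eq_getElem?_getD, List.getElem?_eq_getElem hlt]; rfl

lemma canRemove_elim {M : List (List String)} {r c : Nat}
    (h : canRemove M (r : Int) (c : Int) = true) :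
    r < M.length ∧ c < (M.getD r []).length ∧ (M.getD r []).getD c "" = "@" ∧
      adjacentRolls M (r : Int) (c : Int) < 4 := by
  unfold canRemove at h
  simp only [Bool.and_eq_true, decide_eq_true_eq] at h
  obtain ⟨h1, h2⟩ := h
  obtain ⟨a, b, cc⟩ := (cellAt_eq_some_iff M r c "@").mp h1
  exact ⟨a, b, cc, h2⟩

lemma turnStep_atCount (M0 : List (List String)) (r : Nat) (st : List (List String) × Int)
    (c : Nat)
    (hst : atCount st.1 ≤ atCount M0 ∧ (0 < st.2 → atCount st.1 < atCount M0) ∧ 0 ≤ st.2) :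
    atCount (turnStep r st c).1 ≤ atCount M0 ∧
      (0 < (turnStep r st c).2 → atCount (turnStep r st c).1 < atCount M0) ∧
      0 ≤ (turnStep r st c).2 := by
  obtain ⟨hs1, hs2, hs3⟩ := hst
  unfold turnStep
  split
  · next hf =>
    obtain ⟨h1, h2, h3, -⟩ := canRemove_elim hf
    have hlt := atCount_setAt st.1 r c h1 h2 h3
    dsimp only
    exact ⟨by omega, fun _ => by omega, by omega⟩
  · exact ⟨hs1, hs2, hs3⟩

lemma turn_atCount (M : List (List String)) :
    atCount (turn M).1 ≤ atCount M ∧ (0 < (turn M).2 → atCount (turn M).1 < atCount M) ∧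
      0 ≤ (turn M).2 := by
  unfold turn
  refine List.foldlRecOn
    (motive := fun st : List (List String) × Int =>
      atCount st.1 ≤ atCount M ∧ (0 < st.2 → atCount st.1 < atCount M) ∧ 0 ≤ st.2)
    (List.range M.length) turnRow
    ⟨le_refl _, fun h => absurd h (by omega), le_refl _⟩ ?_
  intro b hb r _
  unfold turnRow
  exact List.foldlRecOn
    (motive := fun st : List (List String) × Int =>
      atCount st.1 ≤ atCount M ∧ (0 < st.2 → atCount st.1 < atCount M) ∧ 0 ≤ st.2)
    _ _ hb (fun b' hb' c _ => turnStep_atCount M r b' c hb')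

lemma turn_atCount_lt (M : List (List String)) (h : 0 < (turn M).2) :
    atCount (turn M).1 < atCount M := (turn_atCount M).2.1 h

def part2Go (M : List (List String)) (acc : Int) : Int :=
  let t := turn M
  if h : 0 < t.2 then part2Go t.1 (acc + t.2) else acc
termination_by atCount M
decreasing_by exact turn_atCount_lt M h

def part_2 (M : List (List String)) : Int := part2Go M 0

-- ===== PORT B =====
-- the 8 neighbours of a cell (B's `nbrs`)
def nbrs (p : Int × Int) : List (Int × Int) := off8.map (fun d => (p.1 + d.1, p.2 + d.2))

-- B's `cells` comprehension: coordinates of the '@' cells, row-major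
def cellsOf (M : List (List String)) : List (Int × Int) :=
  (List.range M.length).flatMap (fun r =>
    (List.range ((M.headD []).length)).filterMap (fun c =>
      if (M.getD r []).getD c "" = "@" then some ((r : Int), (c : Int)) else none))

-- B's `deg`: how many of p's 8 neighbours are in `live`
def degB (live : PySem.Set (Int × Int)) (p : Int × Int) : Nat :=
  ((nbrs p).filter (fun q => live.contains q)).length

-- one element of a worklist round: remove p if it is live with fewer than 4 live neighbours,
-- pushing its neighbours onto the next worklist
def roundStep (st : PySem.Set (Int × Int) × Int × List (Int × Int)) (p : Int × Int) :
    PySem.Set (Int × Int) × Int × List (Int × Int) :=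
  if st.1.contains p && decide (degB st.1 p < 4) then
    (st.1.discard p, st.2.1 + 1, st.2.2 ++ nbrs p)
  else st

-- termination support for peelGo: a round either removes a live cell or produces an empty worklist
lemma discard_length_lt {s : PySem.Set (Int × Int)} {p : Int × Int} (h : p ∈ s) :
    (s.discard p).length < s.length := by
  have hdef : s.discard p = s.filter (fun y => !(y == p)) := by
    simp [PySem.Set.discard]
  rw [hdef]
  refine lt_of_le_of_ne (List.filter_sublist.length_le) ?_
  intro heq
  have hself := List.filter_sublist.eq_of_length heq
  have hp := List.filter_eq_self.mp hself p h
  simp at hp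

lemma roundStep_cases (live0 : PySem.Set (Int × Int)) (rem0 : Int)
    (st : PySem.Set (Int × Int) × Int × List (Int × Int)) (p : Int × Int)
    (h : st.1.length < live0.length ∨ st = (live0, rem0, ([] : List (Int × Int)))) :
    (roundStep st p).1.length < live0.length ∨
      roundStep st p = (live0, rem0, ([] : List (Int × Int))) := by
  rcases h with h | h
  · unfold roundStep
    split
    · next hf =>
      rw [Bool.and_eq_true] at hf
      have hmem : p ∈ st.1 := by simpa [PySem.Set.contains] using hf.1
      left
      dsimp only
      exact (discard_length_lt hmem).trans h
    · exact Or.inl h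
  · subst h
    unfold roundStep
    split
    · next hf =>
      rw [Bool.and_eq_true] at hf
      have hmem : p ∈ live0 := by simpa [PySem.Set.contains] using hf.1
      left
      dsimp only
      exact discard_length_lt hmem
    · exact Or.inr rfl

lemma roundFold_cases (live : PySem.Set (Int × Int)) (rem : Int)
    (pending : List (Int × Int)) :
    (pending.foldl roundStep (live, rem, ([] : List (Int × Int)))).1.length < live.length ∨
      pending.foldl roundStep (live, rem, ([] : List (Int × Int))) = (live, rem, []) :=
  List.foldlRecOn
    (motive := fun st : PySem.Set (Int × Int) × Int × List (Int × Int) =>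
      st.1.length < live.length ∨ st = (live, rem, ([] : List (Int × Int))))
    pending roundStep
    (Or.inr rfl) (fun b hb p _ => roundStep_cases live rem b p hb)

def peelGo (live : PySem.Set (Int × Int)) (removed : Int) (pending : List (Int × Int)) : Int :=
  if hp : pending = [] then removed
  else
    let st := pending.foldl roundStep (live, removed, [])
    peelGo st.1 st.2.1 st.2.2
termination_by (live.length, pending.length)
decreasing_by
  rw [List.foldl_attach]
  rcases roundFold_cases live removed pending with h | h
  · exact Prod.Lex.left _ _ h
  · rw [h]
    exact Prod.Lex.right _ (List.length_pos_iff.mpr hp)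

def part_2_alt (M : List (List String)) : Int :=
  let cells := cellsOf M
  let live : PySem.Set (Int × Int) := PySem.Set.ofList cells
  let pending := cells.filter (fun p => decide (degB live p < 4))
  peelGo live 0 pending

-- ===== PRECONDITION & SPEC =====
-- Pre_ excludes exactly the ragged grids (a later row shorter than the first row) on which
-- Python A raises IndexError while scanning; on every other input A returns normally.
def Pre_part_2 (M : List (List String)) : Prop :=
  ∀ row ∈ M, (M.headD []).length ≤ row.length
instance (M : List (List String)) : Decidable (Pre_part_2 M) := by
  unfold Pre_part_2; infer_instance

def pvWitness_part_2 : List (List String) := [["@", "@", "."], ["@", "@", "."]]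

def Spec_part_2 (M : List (List String)) (out : Int) : Prop := out = part_2_alt M
instance (M : List (List String)) (out : Int) : Decidable (Spec_part_2 M out) := by
  unfold Spec_part_2; infer_instance

-- ===== CLAIM (what is proved, stated in full; the proofs are below) =====
def Claim_equal_part_2 : Prop :=
  ∀ (M : List (List String)), Dom_part_2 M → Pre_part_2 M → Spec_part_2 M (part_2 M)

-- ===== LEMMAS AND PROOFS =====

lemma off8_nodup : off8.Nodup := by decide

lemma nbrs_nodup (p : Int × Int) : (nbrs p).Nodup := by
  refine List.Nodup.map ?_ off8_nodup
  intro a b hab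
  simp only [Prod.mk.injEq] at hab
  exact Prod.ext (by omega) (by omega)

lemma mem_nbrs_iff (p q : Int × Int) : q ∈ nbrs p ↔
    (-1 ≤ q.1 - p.1 ∧ q.1 - p.1 ≤ 1 ∧ -1 ≤ q.2 - p.2 ∧ q.2 - p.2 ≤ 1 ∧
      ¬(q.1 = p.1 ∧ q.2 = p.2)) := by
  constructor
  · intro h
    simp only [nbrs, off8, List.mem_map, List.mem_cons, List.not_mem_nil, or_false] at h
    obtain ⟨d, hd, hq⟩ := h
    rw [← hq]
    rcases hd with rfl | rfl | rfl | rfl | rfl | rfl | rfl | rfl <;> simp <;> omega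
  · rintro ⟨h1, h2, h3, h4, h5⟩
    simp only [nbrs, off8, List.mem_map, List.mem_cons, List.not_mem_nil, or_false]
    refine ⟨(q.1 - p.1, q.2 - p.2), ?_, by simp⟩
    simp only [Prod.mk.injEq]
    omega

lemma mem_nbrs_symm (p q : Int × Int) : q ∈ nbrs p ↔ p ∈ nbrs q := by
  rw [mem_nbrs_iff, mem_nbrs_iff]
  omega

-- the abstract degree: number of neighbours of p inside L
def deg (L : List (Int × Int)) (p : Int × Int) : Nat :=
  L.countP (fun q => decide (q ∈ nbrs p))

-- a set of cells in which every cell has at least 4 neighbours inside the set (a "4-core")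
def Good (S : List (Int × Int)) : Prop := S.Nodup ∧ ∀ p ∈ S, 4 ≤ deg S p

lemma deg_mono {S L : List (Int × Int)} (p : Int × Int) (hS : S.Nodup) (h : S ⊆ L) :
    deg S p ≤ deg L p := by
  unfold deg
  rw [List.countP_eq_length_filter, List.countP_eq_length_filter]
  exact ((hS.filter _).subperm (fun x hx => by
    rcases List.mem_filter.mp hx with ⟨h1, h2⟩
    exact List.mem_filter.mpr ⟨h h1, h2⟩)).length_le

lemma deg_filter_ne {L : List (Int × Int)} {x p : Int × Int}
    (h : p ∉ nbrs x) :
    deg (L.filter (fun y => !(y == p))) x = deg L x := by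
  unfold deg
  rw [List.countP_filter]
  refine List.countP_congr ?_
  intro a _
  by_cases hap : a = p
  · subst hap; simp [h]
  · simp [hap]

lemma inner_mem_fst {M : List (List String)} {r : Nat} {x : Int × Int}
    (hx : x ∈ (List.range ((M.headD []).length)).filterMap
      (fun c => if (M.getD r []).getD c "" = "@" then some ((r : Int), (c : Int)) else none)) :
    x.1 = (r : Int) := by
  rcases List.mem_filterMap.mp hx with ⟨c, -, hc⟩
  rw [Option.ite_none_right_eq_some, Option.some_inj] at hc
  rw [← hc.2]

lemma inner_nodup (M : List (List String)) (r : Nat) :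
    ((List.range ((M.headD []).length)).filterMap
      (fun c => if (M.getD r []).getD c "" = "@" then some ((r : Int), (c : Int)) else none)).Nodup := by
  refine (List.nodup_range).filterMap ?_
  intro a a' b hb hb'
  rw [Option.mem_def, Option.ite_none_right_eq_some, Option.some_inj] at hb hb'
  have h := hb.2.trans hb'.2.symm
  have h2 : (a : Int) = (a' : Int) := congrArg Prod.snd h
  exact_mod_cast h2

lemma nodup_flatMap_range {β : Type} (f : Nat → List β) (n : Nat)
    (hf : ∀ r, (f r).Nodup) (hdisj : ∀ r1 r2 x, x ∈ f r1 → x ∈ f r2 → r1 = r2) :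
    ((List.range n).flatMap f).Nodup := by
  induction n with
  | zero => simp
  | succ n ih =>
    rw [List.range_succ, List.flatMap_append, List.flatMap_cons, List.flatMap_nil,
      List.append_nil]
    refine ih.append (hf n) ?_
    intro x hx hxn
    rcases List.mem_flatMap.mp hx with ⟨r, hr, hxr⟩
    have he := hdisj r n x hxr hxn
    subst he
    exact absurd (List.mem_range.mp hr) (lt_irrefl _)

lemma cellsOf_nodup (M : List (List String)) : (cellsOf M).Nodup := by
  unfold cellsOf
  refine nodup_flatMap_range _ _ (fun r => inner_nodup M r) ?_
  intro r1 r2 x h1 h2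
  have e1 := inner_mem_fst h1
  have e2 := inner_mem_fst h2
  have : (r1 : Int) = (r2 : Int) := e1.symm.trans e2
  exact_mod_cast this

lemma mem_cellsOf {M : List (List String)} {q : Int × Int} :
    q ∈ cellsOf M ↔ ∃ r, r < M.length ∧ ∃ c, c < (M.headD []).length ∧
      (M.getD r []).getD c "" = "@" ∧ ((r : Int), (c : Int)) = q := by
  simp [cellsOf, Option.ite_none_right_eq_some]

lemma getD_ne_default_lt {row : List String} {c : Nat} (h : row.getD c "" = "@") :
    c < row.length := by
  by_contra hge
  rw [List.getD_eq_default] at h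
  · exact absurd h (by decide)
  · omega

-- bound-and-cell test of A's inner loop ↔ membership in cellsOf
lemma cond_iff (M : List (List String)) (i j : Int) :
    (¬(i < 0 ∨ j < 0 ∨ (M.length : Int) ≤ i ∨ ((M.headD []).length : Int) ≤ j) ∧
      cellAt M i j = some "@") ↔ (i, j) ∈ cellsOf M := by
  rw [mem_cellsOf]
  constructor
  · rintro ⟨hb, hc⟩
    rw [not_or, not_or, not_or] at hb
    obtain ⟨h1, h2, h3, h4⟩ := hb
    have hi : i = ((i.toNat : Nat) : Int) := by omega
    have hj : j = ((j.toNat : Nat) : Int) := by omega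
    rw [hi, hj] at hc
    obtain ⟨ha, hbb, hcc⟩ := (cellAt_eq_some_iff M i.toNat j.toNat "@").mp hc
    exact ⟨i.toNat, by omega, j.toNat, by omega, hcc, by rw [← hi, ← hj]⟩
  · rintro ⟨r, hr, c, hcC, hcell, hq⟩
    have hi : (r : Int) = i := congrArg Prod.fst hq
    have hj : (c : Int) = j := congrArg Prod.snd hq
    subst hi; subst hj
    refine ⟨by omega, ?_⟩
    exact (cellAt_eq_some_iff M r c "@").mpr ⟨hr, getD_ne_default_lt hcell, hcell⟩

lemma countP_shift (L : List (Int × Int)) (hL : L.Nodup) (p : Int × Int) :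
    off8.countP (fun d => decide ((p.1 + d.1, p.2 + d.2) ∈ L)) = deg L p := by
  unfold deg
  rw [List.countP_eq_length_filter, List.countP_eq_length_filter]
  have hmap : ((off8.filter (fun d => decide ((p.1 + d.1, p.2 + d.2) ∈ L))).map
      (fun d => (p.1 + d.1, p.2 + d.2))).length
      = (off8.filter (fun d => decide ((p.1 + d.1, p.2 + d.2) ∈ L))).length :=
    List.length_map ..
  rw [← hmap]
  refine List.Perm.length_eq ((List.perm_ext_iff_of_nodup ?_ (hL.filter _)).mpr ?_)
  · refine List.Nodup.map ?_ (off8_nodup.filter _)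
    intro a b hab
    simp only [Prod.mk.injEq] at hab
    exact Prod.ext (by omega) (by omega)
  · intro q
    simp only [List.mem_map, List.mem_filter, decide_eq_true_eq]
    constructor
    · rintro ⟨d, ⟨hd, hmem⟩, rfl⟩
      exact ⟨hmem, by exact List.mem_map.mpr ⟨d, hd, rfl⟩⟩
    · rintro ⟨hq, hnb⟩
      rcases List.mem_map.mp hnb with ⟨d, hd, rfl⟩
      exact ⟨d, ⟨hd, hq⟩, rfl⟩

-- KEY: A's neighbour count is the abstract degree over cellsOf
lemma adjacentRolls_eq (M : List (List String)) (p : Int × Int) :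
    adjacentRolls M p.1 p.2 = (deg (cellsOf M) p : Int) := by
  unfold adjacentRolls
  have hcongr : ∀ (a : Int), ∀ d ∈ off8,
      (if p.1 + d.1 < 0 ∨ p.2 + d.2 < 0 ∨ (M.length : Int) ≤ p.1 + d.1 ∨
          ((M.headD []).length : Int) ≤ p.2 + d.2 then a
       else if cellAt M (p.1 + d.1) (p.2 + d.2) = some "@" then a + 1 else a)
      = (if (p.1 + d.1, p.2 + d.2) ∈ cellsOf M then a + 1 else a) := by
    intro a d _
    by_cases hb : p.1 + d.1 < 0 ∨ p.2 + d.2 < 0 ∨ (M.length : Int) ≤ p.1 + d.1 ∨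
        ((M.headD []).length : Int) ≤ p.2 + d.2
    · rw [if_pos hb, if_neg]
      intro hmem
      exact ((cond_iff M _ _).mpr hmem).1 hb
    · rw [if_neg hb]
      by_cases hc : cellAt M (p.1 + d.1) (p.2 + d.2) = some "@"
      · rw [if_pos hc, if_pos ((cond_iff M _ _).mp ⟨hb, hc⟩)]
      · rw [if_neg hc, if_neg]
        intro hmem
        exact hc ((cond_iff M _ _).mpr hmem).2
  rw [PySem.List.foldl_congr_mem off8 _ _ 0 hcongr, PySem.List.foldl_ite_add_one,
    countP_shift (cellsOf M) (cellsOf_nodup M) p]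
  omega

lemma degB_eq {live : PySem.Set (Int × Int)} (h : live.Nodup) (p : Int × Int) :
    degB live p = deg live p := by
  unfold degB deg
  rw [List.countP_eq_length_filter]
  refine List.Perm.length_eq ((List.perm_ext_iff_of_nodup ((nbrs_nodup p).filter _)
    (h.filter _)).mpr ?_)
  intro q
  constructor
  · intro hq
    obtain ⟨h1, h2⟩ := List.mem_filter.mp hq
    have hql : q ∈ live := by simpa [PySem.Set.contains] using h2
    exact List.mem_filter.mpr ⟨hql, by simpa using h1⟩
  · intro hq
    obtain ⟨h1, h2⟩ := List.mem_filter.mp hq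
    have hqn : q ∈ nbrs p := by simpa using h2
    exact List.mem_filter.mpr ⟨hqn, by simpa [PySem.Set.contains] using h1⟩

-- ========== A-side: one turn ==========

def TRel (a b : List (List String) × Int) : Prop :=
  b.1.length = a.1.length ∧ (b.1.headD []).length = (a.1.headD []).length ∧
  cellsOf b.1 ⊆ cellsOf a.1 ∧
  ((cellsOf b.1).length : Int) + b.2 = ((cellsOf a.1).length : Int) + a.2 ∧
  a.2 ≤ b.2 ∧
  ∀ S, Good S → S ⊆ cellsOf a.1 → S ⊆ cellsOf b.1

lemma TRel_refl (a : List (List String) × Int) : TRel a a :=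
  ⟨rfl, rfl, fun _ h => h, rfl, le_refl _, fun _ _ h => h⟩

lemma TRel_trans {a b c : List (List String) × Int} (h1 : TRel a b) (h2 : TRel b c) :
    TRel a c := by
  obtain ⟨a1, a2, a3, a4, a5, a6⟩ := h1
  obtain ⟨b1, b2, b3, b4, b5, b6⟩ := h2
  exact ⟨b1.trans a1, b2.trans a2, fun x hx => a3 (b3 hx), by omega, a5.trans b5,
    fun S hS hsub => b6 S hS (a6 S hS hsub)⟩

lemma getD_set_list {α : Type} (l : List α) (i j : Nat) (x d : α) :
    (l.set i x).getD j d = if i = j ∧ i < l.length then x else l.getD j d := by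
  induction l generalizing i j with
  | nil => simp
  | cons a t ih =>
    cases i with
    | zero =>
      cases j with
      | zero => simp
      | succ m => simp
    | succ n =>
      cases j with
      | zero => simp
      | succ m =>
        simp only [List.set_cons_succ, List.getD_cons_succ, List.length_cons, ih n m]
        by_cases h : n = m ∧ n < t.length
        · rw [if_pos h, if_pos (by omega)]
        · rw [if_neg h, if_neg (by omega)]

lemma setAt_headD_length (M : List (List String)) (r c : Nat) (hr : r < M.length) :
    ((setAt M r c).headD []).length = (M.headD []).length := by
  cases M with
  | nil => simp at hr
  | cons a t =>
    cases r with
    | zero => simp [setAt]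
    | succ n => simp [setAt]

lemma cast_pair_eq_iff (a b a' b' : Nat) :
    (((a : Int), (b : Int)) = ((a' : Int), (b' : Int))) ↔ (a = a' ∧ b = b') := by
  simp [Prod.ext_iff]

lemma mem_cellsOf_setAt (M : List (List String)) (r c : Nat) (hr : r < M.length)
    (q : Int × Int) :
    q ∈ cellsOf (setAt M r c) ↔ (q ∈ cellsOf M ∧ q ≠ ((r : Int), (c : Int))) := by
  have hlen : (setAt M r c).length = M.length := by simp [setAt]
  have hC := setAt_headD_length M r c hr
  have hcell : ∀ r' c' : Nat, ((setAt M r c).getD r' []).getD c' "" =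
      if r = r' ∧ c = c' ∧ c < (M.getD r []).length then "." else (M.getD r' []).getD c' "" := by
    intro r' c'
    have hrow : (setAt M r c).getD r' [] =
        if r = r' then (M.getD r []).set c "." else M.getD r' [] := by
      unfold setAt
      rw [getD_set_list]
      by_cases h' : r = r'
      · rw [if_pos ⟨h', hr⟩, if_pos h']
      · rw [if_neg (fun hh => h' hh.1), if_neg h']
    rw [hrow]
    by_cases h1 : r = r'
    · subst h1
      rw [if_pos rfl, getD_set_list]
      by_cases h2 : c = c' ∧ c < (M.getD r []).length
      · rw [if_pos h2, if_pos ⟨rfl, h2.1, h2.2⟩]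
      · rw [if_neg h2, if_neg (fun hh => h2 ⟨hh.2.1, hh.2.2⟩)]
    · rw [if_neg h1, if_neg (fun hh => h1 hh.1)]
  rw [mem_cellsOf, mem_cellsOf]
  constructor
  · rintro ⟨r', hr', c', hc', hcellv, hq⟩
    rw [hlen] at hr'
    rw [hC] at hc'
    rw [hcell r' c'] at hcellv
    by_cases hb : r = r' ∧ c = c' ∧ c < (M.getD r []).length
    · rw [if_pos hb] at hcellv
      exact absurd hcellv (by decide)
    · rw [if_neg hb] at hcellv
      refine ⟨⟨r', hr', c', hc', hcellv, hq⟩, ?_⟩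
      intro hqp
      rw [← hq] at hqp
      obtain ⟨e1, e2⟩ := (cast_pair_eq_iff r' c' r c).mp hqp
      subst e1; subst e2
      exact hb ⟨rfl, rfl, getD_ne_default_lt hcellv⟩
  · rintro ⟨⟨r', hr', c', hc', hcellv, hq⟩, hne⟩
    refine ⟨r', by rw [hlen]; exact hr', c', by rw [hC]; exact hc', ?_, hq⟩
    rw [hcell r' c', if_neg ?_]
    · exact hcellv
    · rintro ⟨e1, e2, -⟩
      subst e1; subst e2
      exact hne hq.symm

lemma cellsOf_setAt_length (M : List (List String)) (r c : Nat) (hr : r < M.length)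
    (hc : c < (M.headD []).length) (hcell : (M.getD r []).getD c "" = "@") :
    (cellsOf (setAt M r c)).length + 1 = (cellsOf M).length := by
  have hp : ((r : Int), (c : Int)) ∈ cellsOf M := mem_cellsOf.mpr ⟨r, hr, c, hc, hcell, rfl⟩
  have hperm : (cellsOf (setAt M r c)).Perm ((cellsOf M).erase ((r : Int), (c : Int))) := by
    refine (List.perm_ext_iff_of_nodup (cellsOf_nodup _) ((cellsOf_nodup M).erase _)).mpr ?_
    intro q
    rw [mem_cellsOf_setAt M r c hr q, (cellsOf_nodup M).mem_erase_iff]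
    tauto
  have hle := hperm.length_eq
  rw [List.length_erase_of_mem hp] at hle
  have hpos : 0 < (cellsOf M).length := List.length_pos_of_mem hp
  omega

lemma TRel_step (st : List (List String) × Int) (r c : Nat) (hr : r < st.1.length)
    (hc : c < (st.1.headD []).length) : TRel st (turnStep r st c) := by
  unfold turnStep
  split
  · next hf =>
    obtain ⟨h1, h2, hcell, hadj⟩ := canRemove_elim hf
    have hp : ((r : Int), (c : Int)) ∈ cellsOf st.1 :=
      mem_cellsOf.mpr ⟨r, hr, c, hc, hcell, rfl⟩
    have hmem := mem_cellsOf_setAt st.1 r c hr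
    have hlen := cellsOf_setAt_length st.1 r c hr hc hcell
    have hdeglt : deg (cellsOf st.1) ((r : Int), (c : Int)) < 4 := by
      have hkey := adjacentRolls_eq st.1 ((r : Int), (c : Int))
      dsimp only at hkey
      omega
    refine ⟨?_, ?_, ?_, ?_, ?_, ?_⟩
    · simp [setAt]
    · exact setAt_headD_length st.1 r c hr
    · intro x hx
      exact ((hmem x).mp hx).1
    · dsimp only
      omega
    · dsimp only
      omega
    · intro S hS hsub x hxS
      have hpnot : ((r : Int), (c : Int)) ∉ S := by
        intro hpS
        have h4 := hS.2 _ hpS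
        have hm := deg_mono ((r : Int), (c : Int)) hS.1 hsub
        omega
      refine (hmem x).mpr ⟨hsub hxS, ?_⟩
      intro hxp
      exact hpnot (hxp ▸ hxS)
  · exact TRel_refl st

lemma TRel_inner (st : List (List String) × Int) (r : Nat) (hr : r < st.1.length)
    (l : List Nat) (hl : ∀ c ∈ l, c < (st.1.headD []).length) :
    TRel st (l.foldl (turnStep r) st) := by
  refine List.foldlRecOn (motive := fun b => TRel st b) l (turnStep r) (TRel_refl st) ?_
  intro b hb c hcl
  refine TRel_trans hb (TRel_step b r c ?_ ?_)
  · rw [hb.1]; exact hr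
  · rw [hb.2.1]; exact hl c hcl

lemma TRel_turn (M : List (List String)) : TRel (M, 0) (turn M) := by
  unfold turn
  refine List.foldlRecOn (motive := fun b => TRel (M, 0) b)
    (List.range M.length) turnRow (TRel_refl _) ?_
  intro b hb r hrl
  unfold turnRow
  refine TRel_trans hb (TRel_inner b r ?_ _ (fun c hcl => List.mem_range.mp hcl))
  rw [hb.1]
  exact List.mem_range.mp hrl

-- ========== A-side: a zero turn means no removable cell ==========

lemma turnStep_rem_mono (r : Nat) (st : List (List String) × Int) (c : Nat) :
    st.2 ≤ (turnStep r st c).2 := by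
  unfold turnStep
  split
  · dsimp only; omega
  · exact le_refl _

lemma foldl_rem_mono (r : Nat) (l : List Nat) (st : List (List String) × Int) :
    st.2 ≤ (l.foldl (turnStep r) st).2 := by
  induction l generalizing st with
  | nil => simp
  | cons c l ih => exact (turnStep_rem_mono r st c).trans (ih _)

lemma inner_zero (r : Nat) (l : List Nat) (st : List (List String) × Int)
    (h : (l.foldl (turnStep r) st).2 = st.2) :
    l.foldl (turnStep r) st = st ∧ ∀ c ∈ l, canRemove st.1 (r : Int) (c : Int) = false := by
  induction l generalizing st with
  | nil => exact ⟨rfl, by simp⟩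
  | cons c l ih =>
    simp only [List.foldl_cons] at h ⊢
    have m1 := foldl_rem_mono r l (turnStep r st c)
    have m2 := turnStep_rem_mono r st c
    have he : (turnStep r st c).2 = st.2 := by omega
    cases hb : canRemove st.1 (r : Int) (c : Int) with
    | true =>
      exfalso
      simp [turnStep, hb] at he
    | false =>
      have hstep : turnStep r st c = st := by simp [turnStep, hb]
      rw [hstep] at h ⊢
      obtain ⟨hfold, hall⟩ := ih st h
      refine ⟨hfold, ?_⟩
      intro c' hc'
      rcases List.mem_cons.mp hc' with rfl | hc'
      · exact hb
      · exact hall c' hc'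

lemma turnRow_rem_mono (st : List (List String) × Int) (r : Nat) :
    st.2 ≤ (turnRow st r).2 := foldl_rem_mono r _ st

lemma foldl_turnRow_mono (l : List Nat) (st : List (List String) × Int) :
    st.2 ≤ (l.foldl turnRow st).2 := by
  induction l generalizing st with
  | nil => simp
  | cons r l ih => exact (turnRow_rem_mono st r).trans (ih _)

lemma outer_zero (l : List Nat) (st : List (List String) × Int)
    (h : (l.foldl turnRow st).2 = st.2) :
    l.foldl turnRow st = st ∧
      ∀ r ∈ l, ∀ c ∈ List.range ((st.1.headD []).length),
        canRemove st.1 (r : Int) (c : Int) = false := by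
  induction l generalizing st with
  | nil => exact ⟨rfl, by simp⟩
  | cons r l ih =>
    simp only [List.foldl_cons] at h ⊢
    have m1 := foldl_turnRow_mono l (turnRow st r)
    have m2 := turnRow_rem_mono st r
    have he : (turnRow st r).2 = st.2 := by omega
    have hi := inner_zero r (List.range ((st.1.headD []).length)) st (by simpa [turnRow] using he)
    have heq : turnRow st r = st := by simpa [turnRow] using hi.1
    rw [heq] at h ⊢
    obtain ⟨hfold, hall2⟩ := ih st h
    refine ⟨hfold, ?_⟩
    intro r' hr' c hc
    rcases List.mem_cons.mp hr' with rfl | hr'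
    · exact hi.2 c hc
    · exact hall2 r' hr' c hc

lemma turn_zero (M : List (List String)) (h : (turn M).2 = 0) :
    ∀ r, r < M.length → ∀ c, c < (M.headD []).length →
      canRemove M (r : Int) (c : Int) = false := by
  have hz := outer_zero (List.range M.length) (M, 0) (by simpa [turn] using h)
  intro r hr c hc
  exact hz.2 r (List.mem_range.mpr hr) c (List.mem_range.mpr hc)

lemma Good_cellsOf_of_noremove (M : List (List String))
    (h : ∀ r, r < M.length → ∀ c, c < (M.headD []).length →
      canRemove M (r : Int) (c : Int) = false) : Good (cellsOf M) := by
  refine ⟨cellsOf_nodup M, ?_⟩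
  intro p hp
  obtain ⟨r, hr, c, hc, hcell, hq⟩ := mem_cellsOf.mp hp
  have hcr : c < (M.getD r []).length := getD_ne_default_lt hcell
  have hfalse := h r hr c hc
  have hcellAt : cellAt M (r : Int) (c : Int) = some "@" :=
    (cellAt_eq_some_iff M r c "@").mpr ⟨hr, hcr, hcell⟩
  unfold canRemove at hfalse
  simp only [Bool.and_eq_false_iff, decide_eq_false_iff_not] at hfalse
  rcases hfalse with hf | hf
  · exact absurd hcellAt hf
  · have hkey := adjacentRolls_eq M ((r : Int), (c : Int))
    dsimp only at hkey
    rw [← hq]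
    omega

-- ========== A-side: the whole loop ==========

lemma part2Go_stop (M : List (List String)) (acc : Int) (h : ¬ 0 < (turn M).2) :
    ∃ S : List (Int × Int), part2Go M acc = acc + ((cellsOf M).length : Int) - (S.length : Int) ∧
      Good S ∧ S ⊆ cellsOf M ∧ ∀ T, Good T → T ⊆ cellsOf M → T ⊆ S := by
  obtain ⟨t1, t2, t3, t4, t5, t6⟩ := TRel_turn M
  dsimp only at t4 t5
  have hz : (turn M).2 = 0 := by omega
  refine ⟨cellsOf M, ?_, Good_cellsOf_of_noremove M (turn_zero M hz), fun x hx => hx,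
    fun T _ hT => hT⟩
  rw [part2Go]
  rw [dif_neg h]
  omega

lemma part2Go_spec_aux (n : Nat) : ∀ (M : List (List String)) (acc : Int), atCount M ≤ n →
    ∃ S : List (Int × Int), part2Go M acc = acc + ((cellsOf M).length : Int) - (S.length : Int) ∧
      Good S ∧ S ⊆ cellsOf M ∧ ∀ T, Good T → T ⊆ cellsOf M → T ⊆ S := by
  induction n with
  | zero =>
    intro M acc hn
    by_cases h : 0 < (turn M).2
    · exact absurd (turn_atCount_lt M h) (by omega)
    · exact part2Go_stop M acc h
  | succ n ih =>
    intro M acc hn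
    by_cases h : 0 < (turn M).2
    · have hlt := turn_atCount_lt M h
      obtain ⟨S, hval, hG, hsub, hmax⟩ := ih (turn M).1 (acc + (turn M).2) (by omega)
      obtain ⟨t1, t2, t3, t4, t5, t6⟩ := TRel_turn M
      dsimp only at t4 t5
      refine ⟨S, ?_, hG, fun x hx => t3 (hsub hx), fun T hT hTsub => hmax T hT (t6 T hT hTsub)⟩
      rw [part2Go]
      rw [dif_pos h, hval]
      omega
    · exact part2Go_stop M acc h

lemma part2Go_spec (M : List (List String)) (acc : Int) :
    ∃ S : List (Int × Int), part2Go M acc = acc + ((cellsOf M).length : Int) - (S.length : Int) ∧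
      Good S ∧ S ⊆ cellsOf M ∧ ∀ T, Good T → T ⊆ cellsOf M → T ⊆ S :=
  part2Go_spec_aux (atCount M) M acc (le_refl _)

-- ========== B-side ==========

lemma round_inv (cells : List (Int × Int)) (pending : List (Int × Int)) :
    ∀ (s : PySem.Set (Int × Int) × Int × List (Int × Int)),
      s.1.Nodup → s.1 ⊆ cells → ((s.1.length : Int) + s.2.1 = (cells.length : Int)) →
      (∀ T, Good T → T ⊆ cells → T ⊆ s.1) →
      (∀ x ∈ s.1, deg s.1 x < 4 → x ∈ pending ∨ x ∈ s.2.2) →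
      (pending.foldl roundStep s).1.Nodup ∧
      (pending.foldl roundStep s).1 ⊆ cells ∧
      (((pending.foldl roundStep s).1.length : Int) + (pending.foldl roundStep s).2.1
        = (cells.length : Int)) ∧
      (∀ T, Good T → T ⊆ cells → T ⊆ (pending.foldl roundStep s).1) ∧
      (∀ x ∈ (pending.foldl roundStep s).1, deg (pending.foldl roundStep s).1 x < 4 →
        x ∈ (pending.foldl roundStep s).2.2) := by
  induction pending with
  | nil =>
    intro s h1 h2 h3 h4 h5
    simp only [List.foldl_nil]
    exact ⟨h1, h2, h3, h4, fun x hx hdeg => (h5 x hx hdeg).resolve_left (by simp)⟩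
  | cons p rest ih =>
    intro s h1 h2 h3 h4 h5
    simp only [List.foldl_cons]
    by_cases hfire : (s.1.contains p && decide (degB s.1 p < 4)) = true
    · rw [Bool.and_eq_true] at hfire
      have hmem : p ∈ s.1 := by simpa [PySem.Set.contains] using hfire.1
      have hdegp : deg s.1 p < 4 := by
        have := hfire.2
        rw [degB_eq h1] at this
        simpa using this
      have hrs : roundStep s p = (s.1.discard p, s.2.1 + 1, s.2.2 ++ nbrs p) := by
        unfold roundStep
        rw [if_pos (Bool.and_eq_true .. |>.mpr hfire)]
      rw [hrs]
      have hdisc : s.1.discard p = s.1.filter (fun y => !(y == p)) := by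
        simp [PySem.Set.discard]
      have hmemd : ∀ x, x ∈ s.1.discard p ↔ (x ∈ s.1 ∧ x ≠ p) := by
        intro x
        rw [hdisc]
        simp [List.mem_filter]
      have hnd : (s.1.discard p).Nodup := by rw [hdisc]; exact h1.filter _
      have hlend : (s.1.discard p).length + 1 = s.1.length := by
        have herase : s.1.erase p = s.1.filter (fun y => !(y == p)) := h1.erase_eq_filter p
        rw [hdisc, ← herase, List.length_erase_of_mem hmem]
        have := List.length_pos_of_mem hmem
        omega
      refine ih (s.1.discard p, s.2.1 + 1, s.2.2 ++ nbrs p) hnd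
        (fun x hx => h2 ((hmemd x).mp hx).1) ?_ ?_ ?_
      · dsimp only
        omega
      · intro T hT hTsub x hxT
        have hTs := h4 T hT hTsub
        have hpT : p ∉ T := by
          intro hpT
          have h4T := hT.2 p hpT
          have hm := deg_mono p hT.1 hTs
          omega
        exact (hmemd x).mpr ⟨hTs hxT, fun he => hpT (he ▸ hxT)⟩
      · intro x hx hdegx
        dsimp only at hx hdegx ⊢
        obtain ⟨hxs, hxp⟩ := (hmemd x).mp hx
        by_cases hx4 : deg s.1 x < 4
        · rcases h5 x hxs hx4 with hxpend | hxnxt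
          · rcases List.mem_cons.mp hxpend with rfl | hxrest
            · exact absurd rfl hxp
            · exact Or.inl hxrest
          · exact Or.inr (List.mem_append_left _ hxnxt)
        · have hpn : p ∈ nbrs x := by
            by_contra hpn
            have heq : deg (s.1.discard p) x = deg s.1 x := by
              rw [hdisc]
              exact deg_filter_ne hpn
            omega
          exact Or.inr (List.mem_append_right _ ((mem_nbrs_symm p x).mpr hpn))
    · have hrs : roundStep s p = s := by
        unfold roundStep
        rw [if_neg hfire]
      rw [hrs]
      refine ih s h1 h2 h3 h4 ?_
      intro x hx hdegx
      rcases h5 x hx hdegx with hxpend | hxnxt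
      · rcases List.mem_cons.mp hxpend with rfl | hxrest
        · exfalso
          apply hfire
          rw [Bool.and_eq_true]
          refine ⟨by simpa [PySem.Set.contains] using hx, ?_⟩
          rw [degB_eq h1]
          simpa using hdegx
        · exact Or.inl hxrest
      · exact Or.inr hxnxt

lemma core_final (cells : List (Int × Int)) (live : PySem.Set (Int × Int)) (rem : Int)
    (h1 : live.Nodup) (h2 : live ⊆ cells)
    (h3 : (live.length : Int) + rem = (cells.length : Int))
    (h4 : ∀ T, Good T → T ⊆ cells → T ⊆ live)
    (hcl : ∀ x ∈ live, ¬ deg live x < 4) :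
    ∃ S : List (Int × Int), rem = (cells.length : Int) - (S.length : Int) ∧
      Good S ∧ S ⊆ cells ∧ ∀ T, Good T → T ⊆ cells → T ⊆ S :=
  ⟨live, by omega, ⟨h1, fun p hp => by have := hcl p hp; omega⟩, h2, h4⟩

lemma peelGo_spec_aux (cells : List (Int × Int)) (n : Nat) :
    ∀ (live : PySem.Set (Int × Int)) (rem : Int) (pending : List (Int × Int)),
      live.length ≤ n →
      live.Nodup → live ⊆ cells → ((live.length : Int) + rem = (cells.length : Int)) →
      (∀ T, Good T → T ⊆ cells → T ⊆ live) →
      (∀ x ∈ live, deg live x < 4 → x ∈ pending) →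
      ∃ S : List (Int × Int), peelGo live rem pending = (cells.length : Int) - (S.length : Int) ∧
        Good S ∧ S ⊆ cells ∧ ∀ T, Good T → T ⊆ cells → T ⊆ S := by
  induction n with
  | zero =>
    intro live rem pending hn h1 h2 h3 h4 h5
    by_cases hp : pending = []
    · subst hp
      rw [peelGo, dif_pos rfl]
      exact core_final cells live rem h1 h2 h3 h4
        (fun x hx hd => absurd (h5 x hx hd) (List.not_mem_nil))
    · have hinv := round_inv cells pending (live, rem, []) h1 h2 (by simpa using h3) h4
        (fun x hx hd => Or.inl (h5 x hx hd))
      rw [peelGo, dif_neg hp]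
      dsimp only
      rcases roundFold_cases live rem pending with hlt | heq
      · exact absurd hlt (by omega)
      · rw [heq] at hinv ⊢
        dsimp only at hinv ⊢
        rw [peelGo, dif_pos rfl]
        exact core_final cells live rem hinv.1 hinv.2.1 hinv.2.2.1 hinv.2.2.2.1
          (fun x hx hd => absurd (hinv.2.2.2.2 x hx hd) (List.not_mem_nil))
  | succ n ih =>
    intro live rem pending hn h1 h2 h3 h4 h5
    by_cases hp : pending = []
    · subst hp
      rw [peelGo, dif_pos rfl]
      exact core_final cells live rem h1 h2 h3 h4
        (fun x hx hd => absurd (h5 x hx hd) (List.not_mem_nil))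
    · have hinv := round_inv cells pending (live, rem, []) h1 h2 (by simpa using h3) h4
        (fun x hx hd => Or.inl (h5 x hx hd))
      rw [peelGo, dif_neg hp]
      dsimp only
      rcases roundFold_cases live rem pending with hlt | heq
      · exact ih _ _ _ (by omega) hinv.1 hinv.2.1 hinv.2.2.1 hinv.2.2.2.1 hinv.2.2.2.2
      · rw [heq] at hinv ⊢
        dsimp only at hinv ⊢
        rw [peelGo, dif_pos rfl]
        exact core_final cells live rem hinv.1 hinv.2.1 hinv.2.2.1 hinv.2.2.2.1
          (fun x hx hd => absurd (hinv.2.2.2.2 x hx hd) (List.not_mem_nil))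

lemma part_2_alt_spec (M : List (List String)) :
    ∃ S : List (Int × Int), part_2_alt M = ((cellsOf M).length : Int) - (S.length : Int) ∧
      Good S ∧ S ⊆ cellsOf M ∧ ∀ T, Good T → T ⊆ cellsOf M → T ⊆ S := by
  have hnd := cellsOf_nodup M
  have hofl : PySem.Set.ofList (cellsOf M) = cellsOf M :=
    PySem.Set.ofList_eq_self_of_nodup _ hnd
  have hval : part_2_alt M = peelGo (cellsOf M) 0
      ((cellsOf M).filter (fun p => decide (degB (cellsOf M) p < 4))) := by
    simp only [part_2_alt]
    rw [hofl]
  rw [hval]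
  refine peelGo_spec_aux (cellsOf M) (cellsOf M).length (cellsOf M) 0 _ (le_refl _) hnd
    (fun x hx => hx) (by simp) (fun T _ hT => hT) ?_
  intro x hx hdeg
  refine List.mem_filter.mpr ⟨hx, ?_⟩
  rw [degB_eq hnd]
  simpa using hdeg

-- ===== VERDICT (by name: the statement is the Claim_ definition above) =====
theorem part_2_spec : Claim_equal_part_2 := by
  intro M _ _
  unfold Spec_part_2
  obtain ⟨SA, hA, hGA, hSubA, hMaxA⟩ := part2Go_spec M 0
  obtain ⟨SB, hB, hGB, hSubB, hMaxB⟩ := part_2_alt_spec M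
  have hAB : SA ⊆ SB := hMaxB SA hGA hSubA
  have hBA : SB ⊆ SA := hMaxA SB hGB hSubB
  have hlen : SA.length = SB.length :=
    ((List.perm_ext_iff_of_nodup hGA.1 hGB.1).mpr
      (fun a => ⟨fun h => hAB h, fun h => hBA h⟩)).length_eq
  unfold part_2
  rw [hA, hB, hlen]
  omega
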